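-- pv_equiv track=rewrite | github.com/EDA-Teaching-RJH/assignment-foundations-of-programming-DovGru | fleet_manager.py | calculate_payroll
-- ===== SOURCE A (Python) =====
-- def calculate_payroll(r):
--     total = 0
--
--     for rank in r:                           #assigns a value to a rank
--         if rank == "Captain":
--             total += 1000
--         elif rank == "Commander":
--             total += 800
--         elif rank == "Lt. Commander":
--             total += 600
--         elif rank == "Lieutenant":
--             total += 400
--         elif rank == "Ensign":
--             total += 200
--
--     return total
-- ===== SOURCE B (Python) =====
-- PAY_TABLE = {"Captain": 1000, "Commander": 800, "Lt. Commander": 600,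
--              "Lieutenant": 400, "Ensign": 200}
--
-- def calculate_payroll(r):
--     counts = {}
--     for rank in r:
--         counts[rank] = counts.get(rank, 0) + 1
--     total = 0
--     for rank, n in counts.items():
--         if rank in PAY_TABLE:
--             total += n * PAY_TABLE[rank]
--     return total
-- ===== Notes on version B (the rewrite author's own statement) =====
-- stated objective: alternative
-- what changed: Replaces the per-element if/elif cascade by a count-then-weighted-sum: one pass builds a frequency table of the ranks, then the total is the sum of count * pay over the table entries present in a data-driven pay dict.
import Mathlib
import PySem

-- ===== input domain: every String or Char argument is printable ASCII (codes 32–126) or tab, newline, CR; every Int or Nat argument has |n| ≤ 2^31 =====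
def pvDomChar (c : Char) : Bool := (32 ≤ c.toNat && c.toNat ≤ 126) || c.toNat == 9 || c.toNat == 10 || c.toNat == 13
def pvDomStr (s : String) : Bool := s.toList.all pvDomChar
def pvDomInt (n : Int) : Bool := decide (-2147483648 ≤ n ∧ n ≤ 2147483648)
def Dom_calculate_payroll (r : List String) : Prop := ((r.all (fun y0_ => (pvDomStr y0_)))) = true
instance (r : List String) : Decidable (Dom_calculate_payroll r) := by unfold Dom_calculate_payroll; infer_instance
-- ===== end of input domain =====

-- B replaces A's per-element if/elif cascade by a count-then-weighted-sum over a data-driven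
-- pay table (alternative decomposition, same asymptotic cost).

-- ===== PORT A =====
def calculate_payroll (r : List String) : Int :=
  r.foldl (fun total rank =>
    if rank == "Captain" then total + 1000
    else if rank == "Commander" then total + 800
    else if rank == "Lt. Commander" then total + 600
    else if rank == "Lieutenant" then total + 400
    else if rank == "Ensign" then total + 200
    else total) 0

-- ===== PORT B =====
def pvPayTable : PySem.Dict String Int :=
  PySem.Dict.ofList [("Captain", 1000), ("Commander", 800), ("Lt. Commander", 600),
                     ("Lieutenant", 400), ("Ensign", 200)]

def calculate_payroll_alt (r : List String) : Int :=
  let counts := r.foldl (fun d x => d.insert x (d.getD x 0 + 1))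
    (PySem.Dict.empty : PySem.Dict String Int)
  counts.items.foldl (fun total kn =>
    if pvPayTable.contains kn.1 then total + kn.2 * pvPayTable.getD kn.1 0 else total) 0

-- ===== PRECONDITION & SPEC =====
def Spec_calculate_payroll (r : List String) (out : Int) : Prop := out = calculate_payroll_alt r
instance (r : List String) (out : Int) : Decidable (Spec_calculate_payroll r out) := by unfold Spec_calculate_payroll; infer_instance

-- ===== CLAIM (what is proved, stated in full; the proofs are below) =====
def Claim_equal_calculate_payroll : Prop := ∀ (r : List String), Dom_calculate_payroll r → Spec_calculate_payroll r (calculate_payroll r)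

-- ===== LEMMAS AND PROOFS =====

-- the weight of one rank according to the pay table
def pvW (x : String) : Int := pvPayTable.getD x 0

theorem pvW_eq (x : String) :
    pvW x = (if x == "Captain" then 1000
      else if x == "Commander" then 800
      else if x == "Lt. Commander" then 600
      else if x == "Lieutenant" then 400
      else if x == "Ensign" then 200 else (0:Int)) := by
  simp only [pvW, pvPayTable, PySem.Dict.ofList, PySem.Dict.update, List.foldl,
    PySem.Dict.getD_insert, PySem.Dict.getD_empty, beq_iff_eq]
  split_ifs <;> simp_all

theorem calculate_payroll_eq_sum (r : List String) :
    calculate_payroll r = (r.map pvW).sum := by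
  have hf : (fun (total : Int) (rank : String) =>
      if rank == "Captain" then total + 1000
      else if rank == "Commander" then total + 800
      else if rank == "Lt. Commander" then total + 600
      else if rank == "Lieutenant" then total + 400
      else if rank == "Ensign" then total + 200
      else total) = (fun total rank => total + pvW rank) := by
    funext total rank
    rw [pvW_eq]
    split_ifs <;> simp
  rw [calculate_payroll, hf, PySem.List.foldl_add]
  simp

theorem calculate_payroll_alt_eq_sum (r : List String) :
    calculate_payroll_alt r
      = ((PySem.Set.ofList r).map (fun k => (r.count k : Int) * pvW k)).sum := by
  have hf : (fun (total : Int) (kn : String × Int) =>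
      if pvPayTable.contains kn.1 then total + kn.2 * pvPayTable.getD kn.1 0 else total)
      = (fun total kn => total + kn.2 * pvW kn.1) := by
    funext total kn
    by_cases h : pvPayTable.contains kn.1 = true
    · simp [h, pvW]
    · simp only [Bool.not_eq_true] at h
      simp [h, pvW, PySem.Dict.getD_of_not_contains (h := h)]
  rw [calculate_payroll_alt]
  simp only [PySem.Dict.foldl_insert_getD_add_one_eq_counter, PySem.Dict.items_counter, hf,
    PySem.List.foldl_add]
  simp [List.map_map, Function.comp_def]

theorem sum_counts (r : List String) :
    ((PySem.Set.ofList r).map (fun k => (r.count k : Int) * pvW k)).sum = (r.map pvW).sum := by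
  have hfin : (PySem.Set.ofList r).toFinset = r.toFinset := by
    ext x; simp [PySem.Set.mem_ofList]
  rw [← List.sum_toFinset _ (PySem.Set.nodup_ofList r), hfin,
    Finset.sum_list_map_count r pvW]
  push_cast [nsmul_eq_mul]
  rfl

-- ===== VERDICT (by name: the statement is the Claim_ definition above) =====
theorem calculate_payroll_spec : Claim_equal_calculate_payroll := by
  intro r _
  unfold Spec_calculate_payroll
  rw [calculate_payroll_eq_sum, calculate_payroll_alt_eq_sum, sum_counts]
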